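-- pv_equiv track=rewrite | github.com/MrBrantCode/unitest_baseline | mut_generate/mist_train_cf/cf_91115/solution.py | count_unique_words
-- ===== SOURCE A (Python) =====
-- import string
--
-- def count_unique_words(sentence, stopwords):
--     # Remove punctuation marks
--     sentence = sentence.translate(str.maketrans("", "", string.punctuation))
--
--     # Split sentence into words
--     words = sentence.lower().split()
--
--     # Remove stopwords and count unique words
--     unique_words = set()
--     for word in words:
--         if word not in stopwords:
--             unique_words.add(word)
--
--     return len(unique_words)
-- ===== SOURCE B (Python) =====
-- import string
--
-- def count_unique_words(sentence, stopwords):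
--     # Same cleaning: strip punctuation, lowercase, split
--     cleaned = sentence.translate(str.maketrans("", "", string.punctuation))
--     # Sort the non-stopword words, then count boundaries between adjacent
--     # distinct words: in a sorted list equal words are contiguous, so the
--     # number of positions where a word differs from its predecessor is
--     # exactly the number of distinct words.  No set is built at all.
--     ws = sorted(w for w in cleaned.lower().split() if w not in stopwords)
--     count = 0
--     prev = None
--     for w in ws:
--         if w != prev:
--             count += 1
--         prev = w
--     return count
-- ===== Notes on version B (the rewrite author's own statement) =====
-- stated objective: alternative
-- what changed: Instead of accumulating a hash set with a per-word membership guard, B sorts the non-stopword words and counts boundaries between adjacent distinct words in one linear scan (sort-then-scan distinct counting); correct because equal words are contiguous in a sorted list.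
import Mathlib
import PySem

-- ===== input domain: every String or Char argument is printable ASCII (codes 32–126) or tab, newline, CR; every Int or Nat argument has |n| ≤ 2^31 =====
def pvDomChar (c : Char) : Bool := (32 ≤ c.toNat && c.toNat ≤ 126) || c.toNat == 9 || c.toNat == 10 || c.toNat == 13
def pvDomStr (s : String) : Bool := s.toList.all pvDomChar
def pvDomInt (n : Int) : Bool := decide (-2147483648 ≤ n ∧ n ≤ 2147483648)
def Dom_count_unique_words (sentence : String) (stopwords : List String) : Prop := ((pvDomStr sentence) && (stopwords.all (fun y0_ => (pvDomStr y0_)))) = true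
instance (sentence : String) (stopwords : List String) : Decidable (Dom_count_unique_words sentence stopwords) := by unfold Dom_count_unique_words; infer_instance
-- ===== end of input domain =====

-- B replaces A's set-building loop by sort-then-scan distinct counting (sort the
-- non-stopword words, count boundaries between adjacent distinct words); proved equal on Dom.

-- string.punctuation (exact: the 32 ASCII punctuation characters)
def pvPunct : List Char := "!\"#$%&'()*+,-./:;<=>?@[\\]^_`{|}~".toList

-- ===== PORT A =====
def count_unique_words (sentence : String) (stopwords : List String) : Int :=
  -- sentence.translate(str.maketrans("", "", string.punctuation)): drop punctuation chars (exact)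
  let cleaned := String.ofList (sentence.toList.filter (fun c => !(pvPunct.contains c)))
  let words := PySem.Str.split₀ (PySem.Str.lower cleaned)
  let unique_words := words.foldl
    (fun (s : PySem.Set String) word =>
      if !(stopwords.contains word) then PySem.Set.add s word else s)
    PySem.Set.empty
  (PySem.Set.len unique_words : Int)

-- ===== PORT B =====
def count_unique_words_alt (sentence : String) (stopwords : List String) : Int :=
  let cleaned := String.ofList (sentence.toList.filter (fun c => !(pvPunct.contains c)))
  let words := PySem.Str.split₀ (PySem.Str.lower cleaned)
  -- sorted(w for w in words if w not in stopwords)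
  let ws := PySem.List.sorted (words.filter (fun w => !(stopwords.contains w))) (fun x => x) false
  -- linear scan: count += 1 whenever w != prev (prev starts as None)
  let r := ws.foldl
    (fun (acc : Int × Option String) w =>
      (if some w ≠ acc.2 then acc.1 + 1 else acc.1, some w))
    (0, none)
  r.1

-- ===== PRECONDITION & SPEC =====
def Spec_count_unique_words (sentence : String) (stopwords : List String) (out : Int) : Prop := out = count_unique_words_alt sentence stopwords
instance (sentence : String) (stopwords : List String) (out : Int) : Decidable (Spec_count_unique_words sentence stopwords out) := by unfold Spec_count_unique_words; infer_instance

-- ===== CLAIM (what is proved, stated in full; the proofs are below) =====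
def Claim_equal_count_unique_words : Prop := ∀ (sentence : String) (stopwords : List String), Dom_count_unique_words sentence stopwords → Spec_count_unique_words sentence stopwords (count_unique_words sentence stopwords)

-- ===== LEMMAS AND PROOFS =====

-- the number of boundaries B's scan counts, as a recursion on the list with the previous word
def pvCountNew : List String → Option String → Int
  | [], _ => 0
  | w :: t, p => (if some w ≠ p then 1 else 0) + pvCountNew t (some w)

-- B's foldl computes pvCountNew
theorem pv_scan_fst (l : List String) (c : Int) (p : Option String) :
    (l.foldl (fun (acc : Int × Option String) w =>
        (if some w ≠ acc.2 then acc.1 + 1 else acc.1, some w)) (c, p)).1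
      = c + pvCountNew l p := by
  induction l generalizing c p with
  | nil => simp [pvCountNew]
  | cons w t ih =>
    simp only [List.foldl_cons, pvCountNew, ih]
    split <;> omega

-- building a Set on top of a seed s appends exactly the new elements
theorem pv_foldl_add_seed (t : List String) (s : List String) :
    t.foldl PySem.Set.add s
      = s ++ ((PySem.Set.ofList t).filter (fun x => !(s.contains x))) := by
  induction t generalizing s with
  | nil => simp [PySem.Set.ofList, PySem.Set.empty]
  | cons x rest ih =>
    have hof : PySem.Set.ofList (x :: rest)
        = [x] ++ ((PySem.Set.ofList rest).filter (fun y => !([x].contains y))) := by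
      show (x :: rest).foldl PySem.Set.add [] = _
      rw [List.foldl_cons]
      have : PySem.Set.add ([] : PySem.Set String) x = [x] := by
        simp [PySem.Set.add, PySem.Set.contains]
      rw [this, ih]
    rw [List.foldl_cons, hof]
    by_cases hx : x ∈ s
    · have hadd : PySem.Set.add s x = s := by simp [PySem.Set.add, hx]
      rw [hadd, ih]
      congr 1
      simp only [List.filter_append, List.filter_filter]
      have h1 : ([x].filter (fun y => !(s.contains y))) = [] := by
        simp [List.filter, hx]
      rw [h1, List.nil_append]
      apply List.filter_congr
      intro y _
      by_cases hyx : y = x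
      · subst hyx; simp [hx]
      · simp [hyx]
    · have hadd : PySem.Set.add s x = s ++ [x] := by simp [PySem.Set.add, hx]
      rw [hadd, ih]
      simp only [List.filter_append, List.filter_filter, List.append_assoc]
      congr 1
      have h1 : ([x].filter (fun y => !(s.contains y))) = [x] := by
        simp [List.filter, hx]
      rw [h1]
      congr 1
      apply List.filter_congr
      intro y _
      by_cases hyx : y = x
      · subst hyx; simp [hx]
      · simp [hyx]

-- cons law for set(...): first occurrence kept, later duplicates dropped
theorem pv_ofList_cons (w : String) (t : List String) :
    PySem.Set.ofList (w :: t)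
      = w :: ((PySem.Set.ofList t).filter (fun x => !(x == w))) := by
  show (w :: t).foldl PySem.Set.add [] = _
  rw [List.foldl_cons]
  have h0 : PySem.Set.add ([] : PySem.Set String) w = [w] := by
    simp [PySem.Set.add, PySem.Set.contains]
  rw [h0, pv_foldl_add_seed]
  simp only [List.cons_append, List.nil_append, List.cons.injEq, true_and]
  apply List.filter_congr
  intro y _
  by_cases hyw : y = w
  · subst hyw; simp
  · simp [hyw]

-- on a ≤-sorted list whose elements all dominate prev, the scan count is the
-- number of distinct elements not equal to prev
theorem pv_countNew_sorted (s : List String) (p : Option String)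
    (hs : s.Pairwise (· ≤ ·))
    (hp : ∀ v, p = some v → ∀ x ∈ s, v ≤ x) :
    pvCountNew s p
      = (((PySem.Set.ofList s).filter (fun x => !(p.toList.contains x))).length : Int) := by
  induction s generalizing p with
  | nil => simp [pvCountNew, PySem.Set.ofList, PySem.Set.empty]
  | cons w t ih =>
    have hwle : ∀ x ∈ t, w ≤ x := by
      intro x hx; exact (List.pairwise_cons.mp hs).1 x hx
    have ht : t.Pairwise (· ≤ ·) := (List.pairwise_cons.mp hs).2
    have hih : pvCountNew t (some w)
        = (((PySem.Set.ofList t).filter (fun x => !(x == w))).length : Int) := by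
      rw [ih (some w) ht (by intro v hv x hx; cases hv; exact hwle x hx)]
      congr 2
      apply List.filter_congr
      intro x _
      by_cases hxw : x = w
      · subst hxw; simp [Option.toList]
      · simp [Option.toList, hxw]
    -- the inner ≠-w filter already forces the outer prev-filter to pass
    have h2 : List.filter (fun x => !(p.toList.contains x))
          ((PySem.Set.ofList t).filter (fun x => !(x == w)))
        = (PySem.Set.ofList t).filter (fun x => !(x == w)) := by
      apply List.filter_eq_self.mpr
      intro x hx
      obtain ⟨hxt', hxw'⟩ := List.mem_filter.mp hx
      have hxt : x ∈ t := (PySem.Set.mem_ofList t x).mp hxt'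
      have hxw : ¬ x = w := by
        intro h; rw [h] at hxw'; simp at hxw'
      cases p with
      | none => simp [Option.toList]
      | some v =>
        simp only [Option.toList, List.contains_cons]
        -- v ≤ w ≤ x and v ≤ x; if v = x then x ≤ w and w ≤ x give x = w
        have hvx : ¬ v = x := by
          intro h
          subst h
          have h1 : v ≤ w := hp v rfl w (List.mem_cons_self)
          have h2 : w ≤ v := hwle v hxt
          exact hxw (le_antisymm h1 h2)
        have hxv : ¬ x = v := fun h => hvx h.symm
        simp [hxv]
    rw [pv_ofList_cons]
    simp only [pvCountNew, hih, List.filter_cons, h2]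
    by_cases hwp : some w = p
    · simp [← hwp]
    · have hpc : (p.toList.contains w) = false := by
        cases p with
        | none => simp [Option.toList]
        | some v =>
          have hwv : ¬ w = v := fun h => hwp (by rw [h.symm])
          simp [Option.toList, hwv]
      have hne : some w ≠ p := hwp
      simp only [hpc, Bool.not_false, if_pos hne, reduceIte, List.length_cons]
      push_cast
      ring

-- A's guarded-add loop builds set(filtered words)
theorem pv_A_side (words : List String) (stopwords : List String) :
    (words.foldl
      (fun (s : PySem.Set String) word =>
        if !(stopwords.contains word) then PySem.Set.add s word else s)
      PySem.Set.empty)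
      = PySem.Set.ofList (words.filter (fun w => !(stopwords.contains w))) := by
  rw [PySem.List.foldl_if_eq_foldl_filter]
  rw [PySem.Set.ofList_eq_foldl]
  rfl

-- the two counts agree for any word list
theorem pv_main (words : List String) (stopwords : List String) :
    (PySem.Set.len (words.foldl
      (fun (s : PySem.Set String) word =>
        if !(stopwords.contains word) then PySem.Set.add s word else s)
      PySem.Set.empty) : Int)
      = ((PySem.List.sorted (words.filter (fun w => !(stopwords.contains w))) (fun x => x) false).foldl
          (fun (acc : Int × Option String) w =>
            (if some w ≠ acc.2 then acc.1 + 1 else acc.1, some w)) (0, none)).1 := by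
  set l := words.filter (fun w => !(stopwords.contains w)) with hl
  set ws := PySem.List.sorted l (fun x => x) false with hws
  rw [pv_A_side, pv_scan_fst]
  have hpair : ws.Pairwise (· ≤ ·) := by
    have := PySem.List.sorted_pairwise (κ := String) l (fun x => x)
    simpa using this
  rw [pv_countNew_sorted ws none hpair (by intro v hv; cases hv)]
  have hfilt : List.filter (fun x => !((none : Option String).toList.contains x)) (PySem.Set.ofList ws)
      = PySem.Set.ofList ws := by
    apply List.filter_eq_self.mpr
    intro x _
    simp [Option.toList]
  rw [hfilt]
  have hperm : (PySem.Set.ofList l).Perm (PySem.Set.ofList ws) := by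
    rw [List.perm_ext_iff_of_nodup (PySem.Set.nodup_ofList _) (PySem.Set.nodup_ofList _)]
    intro a
    simp [PySem.Set.mem_ofList, hws, PySem.List.mem_sorted]
  simp only [PySem.Set.len]
  rw [hperm.length_eq]
  omega

-- ===== VERDICT (by name: the statement is the Claim_ definition above) =====
theorem count_unique_words_spec : Claim_equal_count_unique_words := by
  intro sentence stopwords _
  unfold Spec_count_unique_words count_unique_words count_unique_words_alt
  exact pv_main _ _
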